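-- pv_equiv track=rewrite | github.com/fodorzsolt98/Private-set-intersection | secret_list_creator.py | compute_index_lists_for_free_slots
-- ===== SOURCE A (Python) =====
-- def compute_index_lists_for_free_slots(party1_points_list, party2_points_list):
--     party1_index_list = []
--     party2_index_list = []
--
--     for i in range(0, len(party1_points_list)):
--         for j in range(0, len(party2_points_list)):
--             if party1_points_list[i] == party2_points_list[j]:
--                 party1_index_list.append(j)
--                 party2_index_list.append(i)
--
--     return party1_index_list, party2_index_list
-- ===== SOURCE B (Python) =====
-- def compute_index_lists_for_free_slots(party1_points_list, party2_points_list):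
--     indices_by_value = {}
--     for j, v in enumerate(party2_points_list):
--         indices_by_value.setdefault(v, []).append(j)
--     party1_index_list = []
--     party2_index_list = []
--     for i, v in enumerate(party1_points_list):
--         for j in indices_by_value.get(v, []):
--             party1_index_list.append(j)
--             party2_index_list.append(i)
--     return party1_index_list, party2_index_list
-- ===== Notes on version B (the rewrite author's own statement) =====
-- stated objective: faster
-- what changed: Replaced the nested O(n*m) scan with a hash map from value to its list of party2 indices built in one pass, then a single scan of party1 that looks each value up.
import Mathlib
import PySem

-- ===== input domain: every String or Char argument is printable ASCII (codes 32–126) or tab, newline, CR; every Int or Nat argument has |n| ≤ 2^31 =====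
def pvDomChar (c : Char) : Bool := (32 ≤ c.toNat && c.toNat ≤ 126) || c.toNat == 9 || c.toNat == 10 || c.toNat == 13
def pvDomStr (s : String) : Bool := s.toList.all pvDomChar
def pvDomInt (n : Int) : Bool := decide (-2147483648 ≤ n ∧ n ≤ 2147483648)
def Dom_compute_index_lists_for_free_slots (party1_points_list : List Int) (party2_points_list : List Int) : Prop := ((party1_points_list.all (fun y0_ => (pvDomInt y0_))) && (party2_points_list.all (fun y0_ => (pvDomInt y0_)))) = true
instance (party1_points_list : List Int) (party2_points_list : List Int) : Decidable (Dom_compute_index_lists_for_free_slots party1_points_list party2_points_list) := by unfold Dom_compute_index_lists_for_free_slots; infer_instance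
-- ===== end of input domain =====

-- B replaces A's nested O(n*m) scan by a one-pass dict value -> party2-index list, then one scan of party1 (faster, asymptotic).
-- ===== PORT A =====
def compute_index_lists_for_free_slots (party1_points_list : List Int) (party2_points_list : List Int) : List Int × List Int :=
  ((PySem.List.pyRange 0 (party1_points_list.length : Int) 1).foldl (fun acc i =>
    (PySem.List.pyRange 0 (party2_points_list.length : Int) 1).foldl (fun acc2 j =>
      if PySem.List.pyGetD party1_points_list i 0 == PySem.List.pyGetD party2_points_list j 0 then
        (acc2.1 ++ [j], acc2.2 ++ [i])
      else acc2) acc)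
    (([] : List Int), ([] : List Int)))

-- ===== PORT B =====
-- helper = B's first loop: dict value -> list of party2 indices (setdefault(v, []).append(j))
def pvIndicesByValue (party2_points_list : List Int) : PySem.Dict Int (List Int) :=
  (PySem.List.enumerate party2_points_list 0).foldl
    (fun d p => d.modify p.2 [] (fun l => l ++ [p.1])) PySem.Dict.empty

def compute_index_lists_for_free_slots_alt (party1_points_list : List Int) (party2_points_list : List Int) : List Int × List Int :=
  (PySem.List.enumerate party1_points_list 0).foldl (fun acc p =>
    ((pvIndicesByValue party2_points_list).getD p.2 []).foldl
      (fun acc2 j => (acc2.1 ++ [j], acc2.2 ++ [p.1])) acc)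
    (([] : List Int), ([] : List Int))

-- ===== PRECONDITION & SPEC =====
def Spec_compute_index_lists_for_free_slots (party1_points_list : List Int) (party2_points_list : List Int) (out : List Int × List Int) : Prop := out = compute_index_lists_for_free_slots_alt party1_points_list party2_points_list
instance (party1_points_list : List Int) (party2_points_list : List Int) (out : List Int × List Int) : Decidable (Spec_compute_index_lists_for_free_slots party1_points_list party2_points_list out) := by unfold Spec_compute_index_lists_for_free_slots; infer_instance

-- ===== CLAIM (what is proved, stated in full; the proofs are below) =====
def Claim_equal_compute_index_lists_for_free_slots : Prop := ∀ (party1_points_list : List Int) (party2_points_list : List Int), Dom_compute_index_lists_for_free_slots party1_points_list party2_points_list → Spec_compute_index_lists_for_free_slots party1_points_list party2_points_list (compute_index_lists_for_free_slots party1_points_list party2_points_list)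

-- ===== LEMMAS AND PROOFS =====

-- dict built by the grouping loop: lookup = indices of matching entries, in order
theorem groupDict_getD (l : List (Int × Int)) (d : PySem.Dict Int (List Int)) (x : Int) :
    ((l.foldl (fun d p => d.modify p.2 [] (fun t => t ++ [p.1])) d).getD x [])
      = d.getD x [] ++ ((l.filter (fun p => p.2 == x)).map (·.1)) := by
  induction l generalizing d with
  | nil => simp
  | cons p t ih =>
    simp only [List.foldl_cons, ih, List.filter_cons]
    by_cases h : p.2 = x
    · subst h
      simp [PySem.Dict.getD_modify_self]
    · rw [PySem.Dict.getD_modify_of_ne _ _ _ (by simpa using Ne.symm h)]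
      simp [h]

-- A's inner loop, closed form
theorem innerA (l : List Int) (c : Int → Bool) (i : Int) (acc : List Int × List Int) :
    (l.foldl (fun acc2 j => if c j then (acc2.1 ++ [j], acc2.2 ++ [i]) else acc2) acc)
      = (acc.1 ++ l.filter c, acc.2 ++ (l.filter c).map (fun _ => i)) := by
  obtain ⟨a, b⟩ := acc
  rw [show (fun (acc2 : List Int × List Int) j => if c j then (acc2.1 ++ [j], acc2.2 ++ [i]) else acc2)
        = (fun acc2 j => ((if c j then acc2.1 ++ [j] else acc2.1), (if c j then acc2.2 ++ [i] else acc2.2)))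
      from by funext acc2 j; by_cases h : c j <;> simp [h]]
  rw [PySem.List.foldl_prod_mk (fun a j => if c j then a ++ [j] else a)
        (fun b j => if c j then b ++ [i] else b) l a b,
      PySem.List.foldl_append_if_eq_filter, PySem.List.foldl_append_if]

-- B's inner loop, closed form
theorem innerB (l : List Int) (i : Int) (acc : List Int × List Int) :
    (l.foldl (fun acc2 j => (acc2.1 ++ [j], acc2.2 ++ [i])) acc)
      = (acc.1 ++ l, acc.2 ++ l.map (fun _ => i)) := by
  obtain ⟨a, b⟩ := acc
  rw [PySem.List.foldl_prod_mk (fun a j => a ++ [j]) (fun b _ => b ++ [i]) l a b,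
      PySem.List.foldl_append_singleton_eq_self, PySem.List.foldl_append_singleton_eq_map]

-- the two per-i blocks coincide
theorem block_eq (p2 : List Int) (x : Int) :
    ((pvIndicesByValue p2).getD x [])
      = (PySem.List.pyRange 0 (p2.length : Int) 1).filter
          (fun j => x == PySem.List.pyGetD p2 j 0) := by
  unfold pvIndicesByValue
  rw [groupDict_getD, PySem.List.enumerate_eq_map_pyRange p2 0]
  rw [List.filter_map, List.map_map]
  simp only [Function.comp_def]
  rw [List.map_id']
  exact List.filter_congr (fun j _ => by simp [BEq.comm])

-- ===== VERDICT (by name: the statement is the Claim_ definition above) =====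
theorem compute_index_lists_for_free_slots_spec : Claim_equal_compute_index_lists_for_free_slots := by
  intro p1 p2 _
  unfold Spec_compute_index_lists_for_free_slots
  unfold compute_index_lists_for_free_slots compute_index_lists_for_free_slots_alt
  rw [PySem.List.enumerate_eq_map_pyRange p1 0, List.foldl_map]
  apply PySem.List.foldl_congr_mem
  intro acc i _
  rw [innerA, innerB, block_eq]
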